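-- pv_equiv track=rewrite | github.com/Doctoroscar/RallyBot | addons/randomspawn.py | broccoli_obama
-- ===== SOURCE A (Python) =====
-- def broccoli_obama(leaderboard):
--     sorted_leaderboard = {k: v for k, v in sorted(leaderboard.items(), key=lambda item: item[1])}
--     coins = 5
--     for user in sorted_leaderboard:
--         if coins < 1:
--             break
--         leaderboard[user] += coins
--         coins -= 1
--     return leaderboard
-- ===== SOURCE B (Python) =====
-- def broccoli_obama(leaderboard):
--     selected = set()
--     coins = 5
--     while coins >= 1:
--         remaining = [u for u in leaderboard if u not in selected]
--         if not remaining: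
--             break
--         user = min(remaining, key=leaderboard.get)
--         leaderboard[user] += coins
--         selected.add(user)
--         coins -= 1
--     return leaderboard
-- ===== Notes on version B (the rewrite author's own statement) =====
-- stated objective: alternative
-- what changed: A sorts the whole leaderboard once (stable sort by score) and awards 5..1 to the first five keys of the sorted order; B never sorts: it keeps a set of already-awarded users and repeatedly selects the first minimum-score user among those not yet awarded, awarding the current coin count and decrementing until coins run out or users run out.
import Mathlib
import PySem

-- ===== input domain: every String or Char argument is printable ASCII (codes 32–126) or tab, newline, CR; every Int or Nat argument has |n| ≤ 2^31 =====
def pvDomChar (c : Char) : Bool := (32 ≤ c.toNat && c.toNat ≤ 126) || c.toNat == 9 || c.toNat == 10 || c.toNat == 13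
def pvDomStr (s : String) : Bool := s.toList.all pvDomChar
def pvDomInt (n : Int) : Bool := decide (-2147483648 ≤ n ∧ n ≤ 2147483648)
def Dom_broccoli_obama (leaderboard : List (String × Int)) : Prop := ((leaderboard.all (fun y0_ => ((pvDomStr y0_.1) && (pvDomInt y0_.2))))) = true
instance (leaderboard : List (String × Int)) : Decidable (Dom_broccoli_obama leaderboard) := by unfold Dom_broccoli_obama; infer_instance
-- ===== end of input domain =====

-- B replaces A's single stable sort with repeated first-minimum selection over the not-yet-awarded
-- users (an 'alternative' decomposition, same observable mutation of the leaderboard dict).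

-- ===== PORT A =====
-- one step of A's 'for user in sorted_leaderboard' loop; 'break' is modelled by skipping once
-- coins < 1 (coins only decreases, so skipping the rest equals breaking)
def pvAwardStepA (st : PySem.Dict String Int × Int) (user : String) : PySem.Dict String Int × Int :=
  if st.2 < 1 then st
  else (st.1.modify user 0 (fun v => v + st.2), st.2 - 1)

def broccoli_obama (leaderboard : List (String × Int)) : List (String × Int) :=
  -- {k: v for k, v in sorted(leaderboard.items(), key=lambda item: item[1])}
  let sortedDict : PySem.Dict String Int :=
    (PySem.List.sorted leaderboard (fun item => item.2) false).foldl
      (fun d kv => d.insert kv.1 kv.2) PySem.Dict.empty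
  -- coins = 5; for user in sorted_leaderboard: … ; return leaderboard
  ((sortedDict.keys).foldl pvAwardStepA (PySem.Dict.mk leaderboard, 5)).1.items

-- ===== PORT B =====
-- 'while coins >= 1' with integer coins counting 5,4,…: fuel = coins, award value = c+1
def pvBLoop : Nat → PySem.Set String → PySem.Dict String Int → PySem.Dict String Int
  | 0, _, lb => lb
  | c + 1, selected, lb =>
    let remaining := lb.keys.filter (fun u => !(PySem.Set.contains selected u))
    match PySem.List.min? remaining (fun u => lb.getD u 0) with  -- min(remaining, key=leaderboard.get); keys of remaining are present, so get = getD
    | none => lb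
    | some user =>
      pvBLoop c (PySem.Set.add selected user) (lb.modify user 0 (fun v => v + ((c : Int) + 1)))

def broccoli_obama_alt (leaderboard : List (String × Int)) : List (String × Int) :=
  (pvBLoop 5 PySem.Set.empty (PySem.Dict.mk leaderboard)).items

-- ===== PRECONDITION & SPEC =====
-- The parameter is a Python dict; its association-list representation therefore has pairwise
-- distinct keys. Pre_ states exactly that representation invariant (it excludes no Python input).
def Pre_broccoli_obama (leaderboard : List (String × Int)) : Prop :=
  (leaderboard.map Prod.fst).Nodup
instance (leaderboard : List (String × Int)) : Decidable (Pre_broccoli_obama leaderboard) := by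
  unfold Pre_broccoli_obama; infer_instance

def pvWitness_broccoli_obama : (List (String × Int)) :=
  [("a", 7), ("b", 3), ("c", 3), ("d", 9), ("e", 1), ("f", 2)]

def Spec_broccoli_obama (leaderboard : List (String × Int)) (out : List (String × Int)) : Prop := out = broccoli_obama_alt leaderboard
instance (leaderboard : List (String × Int)) (out : List (String × Int)) : Decidable (Spec_broccoli_obama leaderboard out) := by unfold Spec_broccoli_obama; infer_instance

-- ===== CLAIM (what is proved, stated in full; the proofs are below) =====
def Claim_equal_broccoli_obama : Prop := ∀ (leaderboard : List (String × Int)), Dom_broccoli_obama leaderboard → Pre_broccoli_obama leaderboard → Spec_broccoli_obama leaderboard (broccoli_obama leaderboard)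

-- ===== LEMMAS AND PROOFS =====

-- abstract award loop: give the first n users of ks the bonuses n, n-1, …, 1
def pvAward : Nat → List String → PySem.Dict String Int → PySem.Dict String Int
  | 0, _, lb => lb
  | _ + 1, [], lb => lb
  | c + 1, u :: us, lb => pvAward c us (lb.modify u 0 (fun v => v + ((c : Int) + 1)))

-- A's foldl with the (dict, coins) state is the abstract award loop
theorem pvA_foldl_eq_award (ks : List String) (lb : PySem.Dict String Int) (n : Nat) :
    (ks.foldl pvAwardStepA (lb, (n : Int))).1 = pvAward n ks lb := by
  induction ks generalizing lb n with
  | nil => cases n <;> rfl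
  | cons u us ih =>
    cases n with
    | zero => simp [List.foldl_cons, pvAwardStepA, pvAward]; exact ih lb 0
    | succ c =>
      have h1 : ¬ ((c : Int) + 1 < 1) := by omega
      simp only [List.foldl_cons, pvAwardStepA, Nat.cast_succ, if_neg h1, pvAward]
      have : ((c : Int) + 1 - 1) = (c : Int) := by omega
      rw [this]
      exact ih _ c

-- the dict comprehension over a nodup-key list is that list as a dict
theorem pvOfList_fresh (l : List (String × Int)) (h : (l.map Prod.fst).Nodup) :
    l.foldl (fun d kv => d.insert kv.1 kv.2) PySem.Dict.empty = PySem.Dict.mk l := by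
  apply PySem.Dict.ext
  have := PySem.Dict.items_foldl_insert_fresh (l := l) (k := Prod.fst) (v := Prod.snd)
    (d := PySem.Dict.empty) (by intro a _; exact PySem.Dict.contains_empty _) h
  simpa using this

-- min? commutes with map
theorem pvMin?_map {α β κ : Type} [LinearOrder κ] (g : α → β) (k : β → κ) (xs : List α) :
    PySem.List.min? (xs.map g) k = Option.map g (PySem.List.min? xs (fun a => k (g a))) := by
  simp only [PySem.List.min?, List.foldl_map]
  have main : ∀ (acc : Option α),
      xs.foldl (fun acc x =>
        match acc with
        | none => some (g x)
        | some m => if k (g x) < k m then some (g x) else some m) (Option.map g acc)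
      = Option.map g (xs.foldl (fun acc x =>
        match acc with
        | none => some x
        | some m => if k (g x) < k (g m) then some x else some m) acc) := by
    induction xs with
    | nil => intro acc; rfl
    | cons x t ih =>
      intro acc
      cases acc with
      | none => simpa using ih (some x)
      | some m =>
        simp only [List.foldl_cons, Option.map_some]
        by_cases h : k (g x) < k (g m)
        · simpa [h] using ih (some x)
        · simpa [h] using ih (some m)
  simpa using main none

-- min? only depends on the key values on the list
theorem pvMin?_congr {α κ : Type} [LinearOrder κ] (xs : List α) (k₁ k₂ : α → κ)
    (h : ∀ x ∈ xs, k₁ x = k₂ x) :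
    PySem.List.min? xs k₁ = PySem.List.min? xs k₂ := by
  simp only [PySem.List.min?]
  have main : ∀ (acc : Option α), (∀ m, acc = some m → k₁ m = k₂ m) →
      xs.foldl (fun acc x =>
        match acc with
        | none => some x
        | some m => if k₁ x < k₁ m then some x else some m) acc
      = xs.foldl (fun acc x =>
        match acc with
        | none => some x
        | some m => if k₂ x < k₂ m then some x else some m) acc := by
    induction xs with
    | nil => intro acc _; rfl
    | cons x t ih =>
      intro acc hacc
      have hx : k₁ x = k₂ x := h x (by simp)
      have ht : ∀ y ∈ t, k₁ y = k₂ y := fun y hy => h y (by simp [hy])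
      cases acc with
      | none =>
        simp only [List.foldl_cons]
        exact ih ht (some x) (by intro m hm; injection hm with e; subst e; exact hx)
      | some m =>
        have hm : k₁ m = k₂ m := hacc m rfl
        simp only [List.foldl_cons, hx, hm]
        by_cases hlt : k₂ x < k₂ m
        · simp only [if_pos hlt]
          exact ih ht (some x) (by intro m' hm'; injection hm' with e; subst e; exact hx)
        · simp only [if_neg hlt]
          exact ih ht (some m) (by intro m' hm'; injection hm' with e; subst e; exact hm)
  exact main none (by simp)

theorem pvInsertBy_cons {α : Type} (before : α → α → Bool) (x y : α) (ys : List α) :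
    PySem.List.insertBy before x (y :: ys)
      = if before x y then x :: y :: ys else y :: PySem.List.insertBy before x ys := by
  rfl

theorem pvMin?_append_singleton {α κ : Type} [LinearOrder κ] (t : List α) (x : α) (k : α → κ) :
    PySem.List.min? (t ++ [x]) k
      = match PySem.List.min? t k with
        | none => some x
        | some m0 => if k x < k m0 then some x else some m0 := by
  simp only [PySem.List.min?, List.foldl_append, List.foldl_cons, List.foldl_nil]
  rfl

theorem pvSorted_append_singleton {α κ : Type} [LinearOrder κ] (t : List α) (x : α) (k : α → κ) :
    PySem.List.sorted (t ++ [x]) k false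
      = PySem.List.insertBy (fun a b => decide (k a < k b)) x (PySem.List.sorted t k false) := by
  rw [PySem.List.sorted_eq_foldl_insertBy, PySem.List.sorted_eq_foldl_insertBy]
  simp [List.foldl_append]

-- stable sort peels off the first minimum (first element whose value is minimal)
theorem pvSorted_cons_min (xs : List (String × Int)) :
    ∀ m, PySem.List.min? xs (fun p => p.2) = some m →
    PySem.List.sorted xs (fun p => p.2) false
      = m :: PySem.List.sorted (xs.erase m) (fun p => p.2) false := by
  induction xs using List.reverseRecOn with
  | nil => intro m h; simp [PySem.List.min?] at h
  | append_singleton t x ih =>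
    intro m h
    rw [pvMin?_append_singleton] at h
    cases ht : PySem.List.min? t (fun p => p.2) with
    | none =>
      have ht0 : t = [] := (PySem.List.min?_eq_none_iff _ _).mp ht
      subst ht0
      rw [ht] at h
      simp only at h
      injection h with e; subst e
      simp [PySem.List.sorted, PySem.List.insertBy, List.erase_cons_head]
    | some m0 =>
      rw [ht] at h
      have h' : (if x.2 < m0.2 then some x else some m0) = some m := h
      by_cases hlt : x.2 < m0.2
      · rw [if_pos hlt] at h'
        injection h' with e; subst e
        have hxt : x ∉ t := by
          intro hx
          have := PySem.List.min?_isMin ht x hx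
          omega
        have herase : (t ++ [x]).erase x = t := by
          rw [List.erase_append_right _ (by simpa using hxt)]
          simp
        rw [herase, pvSorted_append_singleton, ih m0 ht, pvInsertBy_cons, if_pos (by simpa using hlt),
          ← ih m0 ht]
      · rw [if_neg hlt] at h'
        injection h' with e; subst e
        have hmem : m0 ∈ t := PySem.List.min?_mem ht
        have herase : (t ++ [x]).erase m0 = t.erase m0 ++ [x] :=
          List.erase_append_left _ hmem
        rw [herase, pvSorted_append_singleton, ih m0 ht, pvInsertBy_cons,
          if_neg (by simpa using hlt), pvSorted_append_singleton]

theorem pvSet_contains_add {α : Type} [BEq α] [LawfulBEq α] (s : PySem.Set α) (x u : α) :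
    (PySem.Set.add s x).contains u = (s.contains u || u == x) := by
  simp only [PySem.Set.add]
  split
  · rename_i hc
    by_cases hux : u = x
    · subst hux
      simp only [PySem.Set.contains] at hc ⊢
      simp only [List.contains_iff_mem] at hc
      simp [hc]
    · simp [beq_false_of_ne hux]
  · simp only [PySem.Set.contains, List.contains_append]
    simp only [List.contains_cons, List.contains_nil, Bool.or_false]

-- erasing the first minimum commutes with projecting the keys (keys nodup)
theorem pvMap_fst_erase (xs : List (String × Int)) (m : String × Int)
    (hnd : (xs.map Prod.fst).Nodup) (hm : m ∈ xs) :
    (xs.erase m).map Prod.fst = (xs.map Prod.fst).erase m.1 := by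
  induction xs with
  | nil => cases hm
  | cons p t ih =>
    by_cases hpm : p = m
    · subst hpm
      simp [List.erase_cons_head]
    · have hm' : m ∈ t := by
        cases hm with
        | head => exact absurd rfl hpm
        | tail _ h => exact h
      have hnd' : (t.map Prod.fst).Nodup := (List.nodup_cons.mp (by simpa using hnd)).2
      have hp1 : p.1 ∉ t.map Prod.fst := (List.nodup_cons.mp (by simpa using hnd)).1
      have hp1m : p.1 ≠ m.1 := by
        intro h; exact hp1 (h ▸ List.mem_map_of_mem hm')
      rw [List.erase_cons_tail (by simp [hpm])]
      simp only [List.map_cons]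
      rw [List.erase_cons_tail (by simp [hp1m])]
      rw [ih hnd' hm']

-- main invariant: B's selection loop awards along the stable-sorted order of the
-- still-unawarded entries xs
theorem pvMain (n : Nat) : ∀ (xs : List (String × Int)) (sel : PySem.Set String)
    (lb : PySem.Dict String Int),
    lb.keys.Nodup →
    (xs.map Prod.fst).Nodup →
    lb.keys.filter (fun u => !(PySem.Set.contains sel u)) = xs.map Prod.fst →
    (∀ p ∈ xs, lb.get? p.1 = some p.2) →
    pvBLoop n sel lb
      = pvAward n ((PySem.List.sorted xs (fun p => p.2) false).map Prod.fst) lb := by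
  induction n with
  | zero => intro xs sel lb _ _ _ _; rfl
  | succ c ih =>
    intro xs sel lb hk hx hf hv
    cases hm : PySem.List.min? xs (fun p => p.2) with
    | none =>
      have hxs : xs = [] := (PySem.List.min?_eq_none_iff _ _).mp hm
      subst hxs
      have hrem : lb.keys.filter (fun u => !(PySem.Set.contains sel u)) = [] := by simpa using hf
      show (match PySem.List.min? (lb.keys.filter fun u => !(PySem.Set.contains sel u))
              (fun u => lb.getD u 0) with
            | none => lb
            | some user => pvBLoop c (PySem.Set.add sel user)
                (lb.modify user 0 (fun v => v + ((c : Int) + 1)))) = _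
      rw [hrem]
      rfl
    | some m =>
      have hmx : m ∈ xs := PySem.List.min?_mem hm
      have hget : lb.get? m.1 = some m.2 := hv m hmx
      have hmin : PySem.List.min? (lb.keys.filter (fun u => !(PySem.Set.contains sel u)))
          (fun u => lb.getD u 0) = some m.1 := by
        rw [hf, pvMin?_map Prod.fst (fun u => lb.getD u 0) xs,
          pvMin?_congr xs _ (fun p => p.2)
            (fun p hp => PySem.Dict.getD_of_get?_eq_some _ _ (hv p hp)), hm]
        rfl
      have hstep : pvBLoop (c + 1) sel lb
          = pvBLoop c (PySem.Set.add sel m.1) (lb.modify m.1 0 (fun v => v + ((c : Int) + 1))) := by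
        show (match PySem.List.min? (lb.keys.filter fun u => !(PySem.Set.contains sel u))
                (fun u => lb.getD u 0) with
              | none => lb
              | some user => pvBLoop c (PySem.Set.add sel user)
                  (lb.modify user 0 (fun v => v + ((c : Int) + 1)))) = _
        rw [hmin]
      rw [pvSorted_cons_min xs m hm, List.map_cons, hstep]
      show _ = pvAward c ((PySem.List.sorted (xs.erase m) (fun p => p.2) false).map Prod.fst)
          (lb.modify m.1 0 (fun v => v + ((c : Int) + 1)))
      have hcont : lb.contains m.1 = true := by
        rw [PySem.Dict.contains_eq_isSome_get?, hget]; rfl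
      have hkeys' : (lb.modify m.1 0 (fun v => v + ((c : Int) + 1))).keys = lb.keys := by
        rw [PySem.Dict.keys_modify]; exact PySem.Dict.keys_insert_of_contains _ _ hcont
      have hxe : ((xs.erase m).map Prod.fst).Nodup := by
        rw [pvMap_fst_erase xs m hx hmx]; exact hx.erase m.1
      apply ih (xs.erase m) (PySem.Set.add sel m.1) _ (by rw [hkeys']; exact hk) hxe
      · -- filter condition
        rw [hkeys', pvMap_fst_erase xs m hx hmx]
        have hcg : ∀ u ∈ lb.keys,
            (!(PySem.Set.add sel m.1).contains u) = ((u != m.1) && (!(PySem.Set.contains sel u))) := by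
          intro u _
          rw [pvSet_contains_add]
          by_cases hub : u = m.1
          · subst hub; simp
          · simp [beq_false_of_ne hub]
            exact fun _ => hub
        rw [List.filter_congr hcg, ← List.filter_filter, hf,
          ← List.Nodup.erase_eq_filter hx m.1]
      · -- value condition
        intro p hp
        have hpxs : p ∈ xs := List.mem_of_mem_erase hp
        have hne : p.1 ≠ m.1 := by
          have h1 : p.1 ∈ (xs.map Prod.fst).erase m.1 := by
            rw [← pvMap_fst_erase xs m hx hmx]; exact List.mem_map_of_mem hp
          rw [List.Nodup.erase_eq_filter hx] at h1
          simpa using (List.mem_filter.mp h1).2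
        show (lb.insert m.1 _).get? p.1 = some p.2
        rw [PySem.Dict.get?_insert_of_ne _ _ hne]
        exact hv p hpxs

-- ===== VERDICT (by name: the statement is the Claim_ definition above) =====
theorem broccoli_obama_spec : Claim_equal_broccoli_obama := by
  intro lb _ hpre
  unfold Spec_broccoli_obama broccoli_obama broccoli_obama_alt
  have hsortnd : ((PySem.List.sorted lb (fun item => item.2) false).map Prod.fst).Nodup :=
    ((PySem.List.sorted_perm lb (fun item => item.2) false).map Prod.fst).nodup_iff.mpr hpre
  rw [pvOfList_fresh _ hsortnd]
  show (List.foldl pvAwardStepA (PySem.Dict.mk lb, ((5 : Nat) : Int))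
      ((PySem.List.sorted lb (fun item => item.2) false).map Prod.fst)).1.items
    = (pvBLoop 5 PySem.Set.empty (PySem.Dict.mk lb)).items
  rw [pvA_foldl_eq_award]
  have hk : (PySem.Dict.mk lb).keys.Nodup := by
    show (lb.map Prod.fst).Nodup
    exact hpre
  rw [pvMain 5 lb PySem.Set.empty (PySem.Dict.mk lb) hk hpre
    (by
      show List.filter (fun u => !(PySem.Set.contains [] u)) (lb.map Prod.fst) = lb.map Prod.fst
      simp [PySem.Set.contains])
    (by
      intro p hp
      exact PySem.Dict.get?_of_mem_items _ (by simpa using hp) hk)]
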